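-- pv_equiv track=rewrite | github.com/mr-infty/crd | DeConciniSalvetti.py | subsets_of_cardinality_atmost
-- ===== SOURCE A (Python) =====
-- def subsets_of_cardinality_atmost(S,k):
--     """Returns an iterable of all the subsets of cardinality <= k of the (finite) set S."""
--     assert k >= 0
--     if k > 0 and len(S) > 0:
--         for SS in subsets_of_cardinality_atmost(S[1:], k):
--             yield SS
--             if len(SS) < k:
--                 yield (S[0],)+SS
--     else:
--         yield ()
-- ===== SOURCE B (Python) =====
-- def subsets_of_cardinality_atmost(S, k):
--     """Returns an iterable of all the subsets of cardinality <= k of the (finite) set S."""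
--     assert k >= 0
--     yield from _subsets_below(S, len(S), k)
--
-- def _subsets_below(S, m, k):
--     # All subsets of S[:m] of cardinality <= k, grouped by largest index used,
--     # each subset produced exactly once (built left to right).
--     yield ()
--     if k > 0:
--         for i in range(m):
--             for T in _subsets_below(S, i, k - 1):
--                 yield T + (S[i],)
-- ===== Notes on version B (the rewrite author's own statement) =====
-- stated objective: alternative
-- what changed: A recursively chains n nested generators over suffixes of S, re-yielding every subset at each level and prepending S[0]; B recurses on the largest index used (depth bounded by k), yielding each subset exactly once, built left to right by appending, in the same order.
import Mathlib
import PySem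

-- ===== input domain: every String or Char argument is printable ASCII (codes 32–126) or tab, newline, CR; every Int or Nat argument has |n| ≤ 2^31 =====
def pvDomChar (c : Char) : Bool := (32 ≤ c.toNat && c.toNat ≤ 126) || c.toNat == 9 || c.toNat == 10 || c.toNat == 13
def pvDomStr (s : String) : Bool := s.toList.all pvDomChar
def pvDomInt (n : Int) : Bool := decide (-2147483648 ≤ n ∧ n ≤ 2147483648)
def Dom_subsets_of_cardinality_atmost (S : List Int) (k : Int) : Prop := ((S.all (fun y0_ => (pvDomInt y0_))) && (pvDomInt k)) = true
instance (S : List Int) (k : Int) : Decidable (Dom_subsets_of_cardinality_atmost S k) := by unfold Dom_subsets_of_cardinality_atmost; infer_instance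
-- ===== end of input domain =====

-- B replaces A's chain of n nested generators (each subset re-yielded at every level) by a
-- direct recursion on the largest index used, yielding each subset exactly once in the same order.

-- ===== PORT A =====
-- A is a recursive generator: with k > 0 and S nonempty it re-yields every subset SS of
-- S[1:] and, whenever len(SS) < k, also (S[0],)+SS; otherwise it yields () alone.
-- (Pre_ excludes k < 0, where A's assert fires.)
def subsets_of_cardinality_atmost (S : List Int) (k : Int) : List (List Int) :=
  match S with
  | [] => [[]]
  | x :: rest =>
    if 0 < k then
      (subsets_of_cardinality_atmost rest k).flatMap
        (fun SS => if (SS.length : Int) < k then [SS, x :: SS] else [SS])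
    else [[]]

-- ===== PORT B =====
-- _subsets_below S m k: all subsets of S[:m] of cardinality ≤ k, grouped by largest index
-- used, each subset produced exactly once (built left to right by appending S[i]).
def subsetsBelow (S : List Int) (m : Nat) (k : Int) : List (List Int) :=
  [] ::
    (if 0 < k then
      (List.range m).flatMap (fun i => (subsetsBelow S i (k - 1)).map (fun T => T ++ [S[i]!]))
    else [])
termination_by k.toNat
decreasing_by omega

def subsets_of_cardinality_atmost_alt (S : List Int) (k : Int) : List (List Int) :=
  subsetsBelow S S.length k

-- ===== PRECONDITION & SPEC =====
-- Pre_ excludes exactly k < 0, where A's `assert k >= 0` raises AssertionError.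
def Pre_subsets_of_cardinality_atmost (S : List Int) (k : Int) : Prop := 0 ≤ k
instance (S : List Int) (k : Int) : Decidable (Pre_subsets_of_cardinality_atmost S k) := by
  unfold Pre_subsets_of_cardinality_atmost; infer_instance

def pvWitness_subsets_of_cardinality_atmost : List Int × Int := ([1, 2, 3], 2)

def Spec_subsets_of_cardinality_atmost (S : List Int) (k : Int) (out : List (List Int)) : Prop := out = subsets_of_cardinality_atmost_alt S k
instance (S : List Int) (k : Int) (out : List (List Int)) : Decidable (Spec_subsets_of_cardinality_atmost S k out) := by unfold Spec_subsets_of_cardinality_atmost; infer_instance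

-- ===== CLAIM (what is proved, stated in full; the proofs are below) =====
def Claim_equal_subsets_of_cardinality_atmost : Prop := ∀ (S : List Int) (k : Int), Dom_subsets_of_cardinality_atmost S k → Pre_subsets_of_cardinality_atmost S k → Spec_subsets_of_cardinality_atmost S k (subsets_of_cardinality_atmost S k)

-- ===== LEMMAS AND PROOFS =====

theorem subsetsBelow_zero (S : List Int) (k : Int) : subsetsBelow S 0 k = [[]] := by
  rw [subsetsBelow]; split <;> simp

-- B satisfies A's cons recurrence: putting a new element x in front of the base set acts on
-- B's output exactly as A's per-subset expansion step.
theorem subsetsBelow_cons (kn : Nat) : ∀ (k : Int), 0 ≤ k → k.toNat = kn →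
    ∀ (x : Int) (S : List Int) (m : Nat),
    subsetsBelow (x :: S) (m + 1) k =
      (subsetsBelow S m k).flatMap
        (fun SS => if (SS.length : Int) < k then [SS, x :: SS] else [SS]) := by
  induction kn with
  | zero =>
    intro k hk hkn x S m
    have hk0 : k = 0 := by omega
    subst hk0
    rw [subsetsBelow, subsetsBelow]
    simp
  | succ n ih =>
    intro k hk hkn x S m
    have hkpos : 0 < k := by omega
    rw [subsetsBelow, subsetsBelow]
    simp only [if_pos hkpos]
    rw [List.range_succ_eq_map]
    simp only [List.flatMap_cons, List.flatMap_map, subsetsBelow_zero, List.map_cons,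
      List.map_nil, List.getElem!_cons_zero, List.cons_append, List.nil_append]
    rw [if_pos (by simpa using hkpos)]
    simp only [List.cons_append, List.nil_append]
    refine congrArg _ (congrArg _ ?_)
    rw [List.flatMap_assoc]
    apply List.flatMap_congr
    intro j hj
    rw [show (x :: S)[j.succ]! = S[j]! from List.getElem!_cons_succ ..,
        ih (k - 1) (by omega) (by omega) x S j,
        List.map_flatMap, List.flatMap_map]
    apply List.flatMap_congr
    intro T hT
    by_cases h : (T.length : Int) < k - 1
    · rw [if_pos h, if_pos (by simp; omega)]
      simp
    · rw [if_neg h, if_neg (by simp; omega)]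
      simp

theorem portA_eq_alt (S : List Int) : ∀ k : Int, 0 ≤ k →
    subsets_of_cardinality_atmost S k = subsets_of_cardinality_atmost_alt S k := by
  induction S with
  | nil =>
    intro k hk
    rw [subsets_of_cardinality_atmost]
    unfold subsets_of_cardinality_atmost_alt
    simp [subsetsBelow_zero]
  | cons x rest ih =>
    intro k hk
    rw [subsets_of_cardinality_atmost]
    unfold subsets_of_cardinality_atmost_alt
    by_cases hkpos : 0 < k
    · rw [if_pos hkpos, ih k hk]
      unfold subsets_of_cardinality_atmost_alt
      exact (subsetsBelow_cons k.toNat k hk rfl x rest rest.length).symm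
    · have hk0 : k = 0 := by omega
      subst hk0
      rw [if_neg hkpos, subsetsBelow]
      simp

-- ===== VERDICT (by name: the statement is the Claim_ definition above) =====
theorem subsets_of_cardinality_atmost_spec : Claim_equal_subsets_of_cardinality_atmost := by
  intro S k _ hpre
  exact portA_eq_alt S k hpre
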